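-- pv_equiv track=rewrite | github.com/Junjie-Ye/CCTU | data/check_code/116/check_constraint_1.py | _find_trailing_commas
-- ===== SOURCE A (Python) =====
-- from typing import Tuple, Any, List, Optional
--
-- def _outside_string_mask(s: str) -> List[bool]:
--     """
--     Return a boolean mask indicating whether each character is outside of JSON string literals.
--     Considers JSON string rules with double quotes and backslash escapes.
--     """
--     mask = [True] * len(s)
--     inside = False
--     escape = False
--     for i, ch in enumerate(s):
--         if inside:
--             mask[i] = False
--             if escape:
--                 escape = False
--             else:
--                 if ch == '\\':
--                     escape = True
--                 elif ch == '"':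
--                     inside = False
--         else:
--             if ch == '"':
--                 mask[i] = False
--                 inside = True
--     return mask
--
-- def _find_trailing_commas(s: str) -> List[int]:
--     r"""
--     Detect trailing commas outside string literals, i.e., a comma followed by optional
--     whitespace and then a closing brace or bracket: ,\s*[}\]]
--     Returns list of comma indices considered trailing.
--     """
--     mask = _outside_string_mask(s)
--     bad_indices: List[int] = []
--     i = 0
--     n = len(s)
--     whitespace = set([' ', '\t', '\r', '\n'])
--     while i < n:
--         if s[i] == ',' and mask[i]:
--             j = i + 1
--             while j < n and s[j] in whitespace:
--                 j += 1
--             if j < n and s[j] in ['}', ']']: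
--                 bad_indices.append(i)
--         i += 1
--     return bad_indices
-- ===== SOURCE B (Python) =====
-- def _find_trailing_commas(s: str):
--     bad = []
--     inside = False
--     escape = False
--     pending = None
--     for i, ch in enumerate(s):
--         if inside:
--             if escape:
--                 escape = False
--             elif ch == '\\':
--                 escape = True
--             elif ch == '"':
--                 inside = False
--         elif ch == ',':
--             pending = i
--         elif ch in ' \t\r\n':
--             pass
--         else:
--             if pending is not None and ch in '}]':
--                 bad.append(pending)
--             pending = None
--             if ch == '"':
--                 inside = True
--     return bad
-- ===== Notes on version B (the rewrite author's own statement) =====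
-- stated objective: alternative
-- what changed: Replaces A's two passes (build a full outside-string boolean mask list, then an index loop that re-scans the whitespace run after every comma) with a single forward state-machine pass that tracks inside/escape inline and resolves one pending comma index at the next non-whitespace character (no mask list, no lookahead re-scan).
import Mathlib
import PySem

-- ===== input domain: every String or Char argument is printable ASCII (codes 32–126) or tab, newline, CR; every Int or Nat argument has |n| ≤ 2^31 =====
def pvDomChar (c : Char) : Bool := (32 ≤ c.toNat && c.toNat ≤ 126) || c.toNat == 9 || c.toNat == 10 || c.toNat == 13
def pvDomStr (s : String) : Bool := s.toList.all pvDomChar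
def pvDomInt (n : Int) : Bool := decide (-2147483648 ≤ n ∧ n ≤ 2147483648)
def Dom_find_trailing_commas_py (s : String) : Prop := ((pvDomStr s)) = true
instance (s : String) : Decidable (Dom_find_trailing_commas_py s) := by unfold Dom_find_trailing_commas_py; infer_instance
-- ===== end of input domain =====

-- B replaces A's two passes (mask array + index loop with an inner whitespace re-scan) by one
-- forward state-machine pass carrying a pending comma index (alternative decomposition; no speed claim).

-- ===== PORT A =====
-- mask-building loop of _outside_string_mask, state (inside, escape)
def maskGo : Bool → Bool → List Char → List Bool
  | _, _, [] => []
  | inside, escape, c :: cs =>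
    if inside then
      false :: (if escape then maskGo true false cs
                else if c = '\\' then maskGo true true cs
                else if c = '"' then maskGo false escape cs
                else maskGo true escape cs)
    else if c = '"' then false :: maskGo true escape cs
    else true :: maskGo false escape cs

-- the inner `while j < n and s[j] in whitespace` loop: first char after the run, if any
def firstNonWs? : List Char → Option Char
  | [] => none
  | c :: cs => if c = ' ' ∨ c = '\t' ∨ c = '\r' ∨ c = '\n' then firstNonWs? cs else some c

-- `j < n and s[j] in ['}', ']']`
def isCloser : Option Char → Bool
  | o => o == some '}' || o == some ']'

-- the outer `while i < n` loop over s and mask in parallel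
def scanA : List Char → List Bool → Int → List Int
  | c :: cs, m :: ms, i =>
      (if c = ',' ∧ m = true ∧ isCloser (firstNonWs? cs) = true then [i] else []) ++ scanA cs ms (i + 1)
  | _, _, _ => []

def find_trailing_commas_py (s : String) : List Int :=
  scanA s.toList (maskGo false false s.toList) 0

-- ===== PORT B =====
-- single pass; state (inside, escape, pending comma index, output so far)
def goB : List Char → Bool → Bool → Option Int → List Int → Int → List Int
  | [], _, _, _, acc, _ => acc
  | c :: cs, inside, escape, pending, acc, i =>
    if inside then
      if escape then goB cs true false pending acc (i + 1)
      else if c = '\\' then goB cs true true pending acc (i + 1)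
      else if c = '"' then goB cs false escape pending acc (i + 1)
      else goB cs true escape pending acc (i + 1)
    else if c = ',' then goB cs false escape (some i) acc (i + 1)
    else if c = ' ' ∨ c = '\t' ∨ c = '\r' ∨ c = '\n' then goB cs false escape pending acc (i + 1)
    else goB cs (decide (c = '"')) escape none
           (acc ++ (if c = '}' ∨ c = ']' then pending.toList else [])) (i + 1)

def find_trailing_commas_py_alt (s : String) : List Int :=
  goB s.toList false false none [] 0

-- ===== PRECONDITION & SPEC =====
def Spec_find_trailing_commas_py (s : String) (out : List Int) : Prop := out = find_trailing_commas_py_alt s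
instance (s : String) (out : List Int) : Decidable (Spec_find_trailing_commas_py s out) := by unfold Spec_find_trailing_commas_py; infer_instance

-- ===== CLAIM (what is proved, stated in full; the proofs are below) =====
def Claim_equal_find_trailing_commas_py : Prop := ∀ (s : String), Dom_find_trailing_commas_py s → Spec_find_trailing_commas_py s (find_trailing_commas_py s)

-- ===== LEMMAS AND PROOFS =====

-- what a pending comma at index p contributes, given the rest of the input
def resolve : Option Int → List Char → List Int
  | none, _ => []
  | some p, cs => if isCloser (firstNonWs? cs) then [p] else []

lemma goB_eq (cs : List Char) : ∀ (inside escape : Bool) (pending : Option Int) (acc : List Int) (i : Int),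
    (inside = true → pending = none) →
    goB cs inside escape pending acc i = acc ++ resolve pending cs ++ scanA cs (maskGo inside escape cs) i := by
  induction cs with
  | nil =>
    intro inside escape pending acc i _
    cases pending <;> simp [goB, resolve, firstNonWs?, isCloser, scanA]
  | cons c cs ih =>
    intro inside escape pending acc i h
    cases inside with
    | true =>
      obtain rfl : pending = none := h rfl
      cases escape with
      | true => simp [goB, maskGo, scanA, resolve, ih]
      | false =>
        by_cases hb : c = '\\'
        · subst hb; simp [goB, maskGo, scanA, resolve, ih]
        · by_cases hq : c = '"'
          · subst hq; simp [goB, maskGo, scanA, resolve, ih]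
          · simp [goB, maskGo, scanA, resolve, hb, hq, ih]
    | false =>
      by_cases hc : c = ','
      · subst hc
        cases pending <;> simp [goB, maskGo, scanA, resolve, firstNonWs?, isCloser, ih]
      · by_cases hw : c = ' ' ∨ c = '\t' ∨ c = '\r' ∨ c = '\n'
        · rcases hw with rfl | rfl | rfl | rfl <;> cases pending <;>
            simp [goB, maskGo, scanA, resolve, firstNonWs?, isCloser, ih]
        · by_cases hq : c = '"'
          · subst hq
            cases pending <;> simp [goB, maskGo, scanA, resolve, firstNonWs?, isCloser, ih]
          · by_cases hcl : c = '}' ∨ c = ']'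
            · rcases hcl with rfl | rfl <;> cases pending <;>
                simp [goB, maskGo, scanA, resolve, firstNonWs?, isCloser, ih]
            · cases pending <;>
                simp [goB, maskGo, scanA, resolve, firstNonWs?, isCloser, ih, hw, hc, hq, hcl]

-- ===== VERDICT (by name: the statement is the Claim_ definition above) =====
theorem find_trailing_commas_py_spec : Claim_equal_find_trailing_commas_py := by
  intro s _
  unfold Spec_find_trailing_commas_py find_trailing_commas_py find_trailing_commas_py_alt
  rw [goB_eq _ _ _ _ _ _ (by simp)]
  simp [resolve]
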